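-- pv_equiv track=rewrite | github.com/slntkllr01/Nonogram-Solver | src/btSolver.py | is_valid_partial_row
-- ===== SOURCE A (Python) =====
-- def is_valid_partial_row(row, row_hint):
--     segments = []
--     current_segment = 0
--     for cell in row:
--         if cell == 'x':
--             current_segment += 1
--         elif current_segment > 0:
--             segments.append(current_segment)
--             current_segment = 0
--     if current_segment > 0:
--         segments.append(current_segment)
--
--     if len(segments) > len(row_hint):
--         return False
--
--     for i in range(len(segments)):
--         if segments[i] > row_hint[i]:
--             return False
--
--     return True
-- ===== SOURCE B (Python) =====
-- def is_valid_partial_row(row, row_hint):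
--     run = 0
--     j = 0
--     for cell in row:
--         if cell == 'x':
--             run += 1
--         elif run > 0:
--             if j >= len(row_hint) or run > row_hint[j]:
--                 return False
--             j += 1
--             run = 0
--     if run > 0:
--         return j < len(row_hint) and run <= row_hint[j]
--     return True
-- ===== Notes on version B (the rewrite author's own statement) =====
-- stated objective: alternative
-- what changed: B validates in a single pass keeping only two scalars (current run length and a hint index), checking each segment against its hint the moment the run ends, instead of A's two-phase build-a-segments-list-then-scan-it; the intermediate list disappears.
import Mathlib
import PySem

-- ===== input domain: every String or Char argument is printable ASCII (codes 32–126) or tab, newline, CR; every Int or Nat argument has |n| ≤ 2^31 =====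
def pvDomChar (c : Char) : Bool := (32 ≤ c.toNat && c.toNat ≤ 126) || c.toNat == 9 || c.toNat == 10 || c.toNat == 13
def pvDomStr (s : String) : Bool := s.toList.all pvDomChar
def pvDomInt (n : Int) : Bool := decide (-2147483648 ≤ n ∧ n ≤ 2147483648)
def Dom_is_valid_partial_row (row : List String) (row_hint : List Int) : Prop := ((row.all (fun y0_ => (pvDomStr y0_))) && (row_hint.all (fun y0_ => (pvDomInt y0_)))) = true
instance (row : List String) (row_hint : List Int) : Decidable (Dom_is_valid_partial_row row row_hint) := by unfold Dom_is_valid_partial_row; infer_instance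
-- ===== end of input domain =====

-- B validates the row in one pass with two scalars (current run length, hint index),
-- instead of A's two phases (build a segments list, then compare it to the hints).

-- ===== PORT A =====
-- first loop of A: build the list of completed segments, carrying the current run
def pvBuildSegs : List String → List Int → Int → List Int × Int
  | [], acc, cur => (acc, cur)
  | c :: rest, acc, cur =>
    if c == "x" then pvBuildSegs rest acc (cur + 1)
    else if cur > 0 then pvBuildSegs rest (acc ++ [cur]) 0
    else pvBuildSegs rest acc cur

-- second loop of A: for i in range(len(segments)): if segments[i] > row_hint[i] …
-- (indexes walk both lists in step; A's length guard ensures row_hint never runs out first)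
def pvCheckSegs : List Int → List Int → Bool
  | [], _ => true
  | s :: ss, h :: hs => if s > h then false else pvCheckSegs ss hs
  | _ :: _, [] => true

-- 'segments' after the first loop: completed segments plus the trailing run if any
def pvSegsOf (row : List String) (acc : List Int) (cur : Int) : List Int :=
  if (pvBuildSegs row acc cur).2 > 0 then (pvBuildSegs row acc cur).1 ++ [(pvBuildSegs row acc cur).2]
  else (pvBuildSegs row acc cur).1

def is_valid_partial_row (row : List String) (row_hint : List Int) : Bool :=
  if (pvSegsOf row [] 0).length > row_hint.length then false
  else pvCheckSegs (pvSegsOf row [] 0) row_hint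

-- ===== PORT B =====
-- one pass: run = current 'x' run length, j = index of the next hint to satisfy
def pvGoB (hint : List Int) : List String → Int → Nat → Bool
  | [], run, j =>
    if run > 0 then
      match PySem.List.pyGet? hint (j : Int) with
      | none => false
      | some h => decide (run ≤ h)
    else true
  | c :: rest, run, j =>
    if c == "x" then pvGoB hint rest (run + 1) j
    else if run > 0 then
      match PySem.List.pyGet? hint (j : Int) with
      | none => false
      | some h => if run > h then false else pvGoB hint rest 0 (j + 1)
    else pvGoB hint rest run j

def is_valid_partial_row_alt (row : List String) (row_hint : List Int) : Bool :=
  pvGoB row_hint row 0 0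

-- ===== PRECONDITION & SPEC =====
def Spec_is_valid_partial_row (row : List String) (row_hint : List Int) (out : Bool) : Prop := out = is_valid_partial_row_alt row row_hint
instance (row : List String) (row_hint : List Int) (out : Bool) : Decidable (Spec_is_valid_partial_row row row_hint out) := by unfold Spec_is_valid_partial_row; infer_instance

-- ===== CLAIM (what is proved, stated in full; the proofs are below) =====
def Claim_equal_is_valid_partial_row : Prop := ∀ (row : List String) (row_hint : List Int), Dom_is_valid_partial_row row row_hint → Spec_is_valid_partial_row row row_hint (is_valid_partial_row row row_hint)

-- ===== LEMMAS AND PROOFS =====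

-- the common reference: compare the segments of the row (given the current run) to the remaining hints
def pvChk : List Int → List Int → Bool
  | [], _ => true
  | _ :: _, [] => false
  | s :: ss, h :: hs => if s > h then false else pvChk ss hs

def pvSegsFrom : List String → Int → List Int
  | [], run => if run > 0 then [run] else []
  | c :: rest, run =>
    if c == "x" then pvSegsFrom rest (run + 1)
    else if run > 0 then run :: pvSegsFrom rest 0
    else pvSegsFrom rest run

theorem buildSegs_eq (row : List String) (acc : List Int) (cur : Int) :
    pvSegsOf row acc cur = acc ++ pvSegsFrom row cur := by
  induction row generalizing acc cur with
  | nil =>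
    unfold pvSegsOf
    simp only [pvBuildSegs, pvSegsFrom]
    split <;> simp
  | cons c rest ih =>
    unfold pvSegsOf at ih ⊢
    simp only [pvBuildSegs, pvSegsFrom]
    by_cases hc : c == "x"
    · simp only [hc, if_true]
      exact ih acc (cur + 1)
    · simp only [hc, Bool.false_eq_true, if_false]
      by_cases hcur : cur > 0
      · simp only [hcur, if_true]
        rw [ih (acc ++ [cur]) 0]
        simp
      · simp only [hcur, if_false]
        exact ih acc cur

theorem check_eq (segs hs : List Int) :
    (if segs.length > hs.length then false else pvCheckSegs segs hs) = pvChk segs hs := by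
  induction segs generalizing hs with
  | nil => simp [pvCheckSegs, pvChk]
  | cons s ss ih =>
    cases hs with
    | nil => simp [pvChk]
    | cons h hs' =>
      simp only [pvCheckSegs, pvChk, List.length_cons]
      by_cases hgt : s > h
      · simp [hgt]
      · simp only [if_neg hgt]
        rw [← ih hs']
        congr 1
        simp

theorem goB_drop (hint : List Int) (row : List String) (run : Int) (j : Nat) :
    pvGoB hint row run j = pvChk (pvSegsFrom row run) (hint.drop j) := by
  induction row generalizing run j with
  | nil =>
    simp only [pvGoB, pvSegsFrom]
    split
    · rw [PySem.List.pyGet?_natCast]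
      cases hd : hint.drop j with
      | nil =>
        have : hint[j]? = none := by rw [← List.head?_drop, hd]; rfl
        simp [this, pvChk]
      | cons h hs =>
        have : hint[j]? = some h := by rw [← List.head?_drop, hd]; rfl
        simp only [this, pvChk]
        by_cases hrh : run > h
        · simp [show ¬run ≤ h by omega, hrh]
        · simp [show run ≤ h by omega, hrh]
    · simp [pvChk]
  | cons c rest ih =>
    simp only [pvGoB, pvSegsFrom]
    split
    · exact ih (run + 1) j
    · split
      · rw [PySem.List.pyGet?_natCast]
        cases hd : hint.drop j with
        | nil =>
          have : hint[j]? = none := by rw [← List.head?_drop, hd]; rfl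
          simp [this, pvChk]
        | cons h hs =>
          have : hint[j]? = some h := by rw [← List.head?_drop, hd]; rfl
          simp only [this, pvChk]
          split
          · rfl
          · rw [ih 0 (j + 1)]
            have : hint.drop (j + 1) = hs := by
              rw [← List.drop_drop, hd]; rfl
            rw [this]
      · exact ih run j

-- ===== VERDICT (by name: the statement is the Claim_ definition above) =====
theorem is_valid_partial_row_spec : Claim_equal_is_valid_partial_row := by
  intro row row_hint _
  unfold Spec_is_valid_partial_row is_valid_partial_row is_valid_partial_row_alt
  rw [goB_drop, List.drop_zero, buildSegs_eq, List.nil_append, check_eq]
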